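-- pv_equiv track=rewrite | github.com/dlvql/Algorithm | 프로그래머스/0/181872. 특정 문자열로 끝나는 가장 긴 부분 문자열 찾기/특정 문자열로 끝나는 가장 긴 부분 문자열 찾기.py | solution
-- ===== SOURCE A (Python) =====
-- def solution(myString, pat):
--     w = ''
--     myString, pat = "".join(list(reversed(myString))), "".join(list(reversed(pat)))
--     for i in range(len(myString)):
--         if(myString[i] == pat[0]):
--             w = "".join(list(reversed(myString[i:])))
--             break
--     return w
-- ===== SOURCE B (Python) =====
-- def solution(myString, pat):
--     last = -1
--     for i in range(len(myString)):
--         if myString[i] == pat[-1]: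
--             last = i
--     return myString[:last + 1]
-- ===== Notes on version B (the rewrite author's own statement) =====
-- stated objective: simpler
-- what changed: Single forward pass tracking the index of the last occurrence of pat's final character, then one prefix slice; no reversals, joins, or reversed slices.
import Mathlib
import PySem

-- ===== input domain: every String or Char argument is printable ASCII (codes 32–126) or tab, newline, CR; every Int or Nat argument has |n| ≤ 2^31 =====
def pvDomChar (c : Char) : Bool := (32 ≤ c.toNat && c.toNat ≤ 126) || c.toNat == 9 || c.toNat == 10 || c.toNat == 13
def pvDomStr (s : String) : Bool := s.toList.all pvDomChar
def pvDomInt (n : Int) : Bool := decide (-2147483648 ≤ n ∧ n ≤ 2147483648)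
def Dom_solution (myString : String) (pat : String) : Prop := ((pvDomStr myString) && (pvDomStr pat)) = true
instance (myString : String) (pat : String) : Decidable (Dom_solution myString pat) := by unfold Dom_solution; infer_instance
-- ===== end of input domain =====

-- B replaces A's reverse/scan/re-reverse with one forward pass tracking the last match index, then a prefix slice (objective: simpler).

-- ===== PORT A =====
-- A reverses both strings, scans the reversed myString for the first char equal to
-- reversed pat's first char (= pat's last char), and on a hit returns the reversal
-- of the remaining suffix (breaking the loop). The for-loop-with-break is the
-- structural recursion below: at step i the current suffix IS myString_rev[i:].
def solA_go (ps : List Char) : List Char → String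
  | [] => ""                                   -- loop ends without break: w = ''
  | c :: rest =>
      if ps.head? == some c then               -- myString[i] == pat[0] (pat[0] = ps.head?)
        String.ofList ((c :: rest).reverse)        -- w = reversed(myString[i:]); break
      else solA_go ps rest

def solution (myString : String) (pat : String) : String :=
  solA_go (pat.toList.reverse) (myString.toList.reverse)

-- ===== PORT B =====
-- forward pass: last := index of most recent i with myString[i] == pat[-1]
def solB_go (pz : Option Char) : List Char → Int → Int → Int
  | [], _, last => last
  | c :: rest, i, last => solB_go pz rest (i + 1) (if pz == some c then i else last)

def solution_alt (myString : String) (pat : String) : String :=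
  let last := solB_go (pat.toList.getLast?) myString.toList 0 (-1)
  -- myString[:last+1] with last+1 ≥ 0: Python slice = take (last+1)
  String.ofList (myString.toList.take (last + 1).toNat)

-- ===== PRECONDITION & SPEC =====
-- Pre_ excludes exactly pat = "" with myString ≠ "", where both Pythons raise
-- IndexError (A on pat[0], B on pat[-1], each accessed inside the loop).
def Pre_solution (myString : String) (pat : String) : Prop :=
  pat ≠ "" ∨ myString = ""
instance (myString : String) (pat : String) : Decidable (Pre_solution myString pat) := by
  unfold Pre_solution; infer_instance

def pvWitness_solution : String × String := ("banana", "an")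

def Spec_solution (myString : String) (pat : String) (out : String) : Prop := out = solution_alt myString pat
instance (myString : String) (pat : String) (out : String) : Decidable (Spec_solution myString pat out) := by unfold Spec_solution; infer_instance

-- ===== CLAIM (what is proved, stated in full; the proofs are below) =====
def Claim_equal_solution : Prop := ∀ (myString : String) (pat : String), Dom_solution myString pat → Pre_solution myString pat → Spec_solution myString pat (solution myString pat)

-- ===== LEMMAS AND PROOFS =====

-- A's loop is dropWhile-until-match on the reversed list, then reverse the rest.
theorem solA_go_eq (ps : List Char) (l : List Char) :
    solA_go ps l = String.ofList ((l.dropWhile (fun c => !(ps.head? == some c))).reverse) := by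
  induction l with
  | nil => rfl
  | cons c rest ih =>
      by_cases h : ps.head? = some c
      · have hb : (ps.head? == some c) = true := beq_iff_eq.mpr h
        simp [solA_go, List.dropWhile, hb]
      · have hb : (ps.head? == some c) = false := beq_eq_false_iff_ne.mpr h
        simp [solA_go, List.dropWhile, hb, ih]

-- B's accumulator: value of `last` in terms of the matched suffix length
-- d = length of (cs.reverse.dropWhile (no-match)); result is i + d - 1 if d > 0.
theorem solB_go_eq (pz : Option Char) (cs : List Char) (i last : Int) :
    solB_go pz cs i last =
      (if ((cs.reverse.dropWhile (fun x => !(pz == some x))).length = 0) then last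
       else i + ((cs.reverse.dropWhile (fun x => !(pz == some x))).length : Int) - 1) := by
  induction cs generalizing i last with
  | nil => simp [solB_go]
  | cons c rest ih =>
      have hrec : ((c :: rest).reverse.dropWhile (fun x => !(pz == some x))).length
          = if (rest.reverse.dropWhile (fun x => !(pz == some x))).length = 0
            then (if pz == some c then 1 else 0)
            else (rest.reverse.dropWhile (fun x => !(pz == some x))).length + 1 := by
        rw [show (c :: rest).reverse = rest.reverse ++ [c] by simp, List.dropWhile_append]
        by_cases hd : (rest.reverse.dropWhile (fun x => !(pz == some x))) = []
        · rw [hd]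
          simp only [List.isEmpty_nil, if_true, List.length_nil]
          by_cases hm : pz = some c
          · have hb : (pz == some c) = true := beq_iff_eq.mpr hm
            simp [List.dropWhile, hb]
          · have hb : (pz == some c) = false := beq_eq_false_iff_ne.mpr hm
            simp [List.dropWhile, hb]
        · have hne : (rest.reverse.dropWhile (fun x => !(pz == some x))).length ≠ 0 := by
            simpa [List.length_eq_zero_iff] using hd
          have hie : (rest.reverse.dropWhile (fun x => !(pz == some x))).isEmpty = false := by
            simp [hd]
          rw [hie]
          simp [hne]
      rw [solB_go, ih, hrec]
      by_cases hm : pz = some c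
      · have hb : (pz == some c) = true := beq_iff_eq.mpr hm
        by_cases hd0 : (rest.reverse.dropWhile (fun x => !(pz == some x))).length = 0 <;>
          simp [hb, hd0] <;> omega
      · have hb : (pz == some c) = false := beq_eq_false_iff_ne.mpr hm
        by_cases hd0 : (rest.reverse.dropWhile (fun x => !(pz == some x))).length = 0 <;>
          simp [hb, hd0] <;> omega

-- the matched suffix's reverse is a prefix of the original list
theorem take_drop_rev (q : Char → Bool) (l : List Char) :
    l.take ((l.reverse.dropWhile q).length) = (l.reverse.dropWhile q).reverse := by
  have hsuf : (l.reverse.dropWhile q) <:+ l.reverse := List.dropWhile_suffix q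
  have hpre : (l.reverse.dropWhile q).reverse <+: l := by
    simpa using hsuf.reverse
  have := List.prefix_iff_eq_take.mp hpre
  simpa using this.symm

theorem solution_eq_alt (myString pat : String) :
    solution myString pat = solution_alt myString pat := by
  unfold solution solution_alt
  rw [solA_go_eq, solB_go_eq]
  have hpz : (pat.toList.reverse).head? = pat.toList.getLast? := List.head?_reverse
  set q : Char → Bool := fun c => !(pat.toList.getLast? == some c) with hq
  have hQ : (fun c => !((pat.toList.reverse).head? == some c)) = q := by
    funext c; rw [hpz]
  rw [hQ]
  set d := ((myString.toList.reverse.dropWhile q).length) with hd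
  by_cases h0 : d = 0
  · simp only [h0]
    have : myString.toList.reverse.dropWhile q = [] := by
      exact List.length_eq_zero_iff.mp h0
    simp [this]
  · simp only [if_neg h0]
    have h1 : ((0 : Int) + (d : Int) - 1 + 1).toNat = d := by omega
    rw [h1]
    rw [take_drop_rev q myString.toList]

-- ===== VERDICT (by name: the statement is the Claim_ definition above) =====
theorem solution_spec : Claim_equal_solution := by
  intro ms p _ _
  unfold Spec_solution
  exact solution_eq_alt ms p
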